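-- pv_equiv track=rewrite | github.com/joelramirezjr/CS469_PE08 | treasure_hunter.py | hunt_treasure
-- ===== SOURCE A (Python) =====
-- def hunt_treasure(arr, n, k):
--     """Work out the maximum number of treasures the hunters can find.
--
--     Args:
--         arr (list): A list with 'H' for hunters and 'T' for treasures.
--         n (int): How many spots are in the list.
--         k (int): How far a hunter can reach to grab a treasure.
--
--     Returns:
--         int: The most treasures the hunters can collect.
--     """
--     hunters = []
--     treasures = []
--
--     # Here we go through the list and save the positions of hunters and treasures
--     for i in range(n):
--         if arr[i] == 'H':
--             hunters.append(i)
--         elif arr[i] == 'T':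
--             treasures.append(i)
--
--     # Start both hunters and treasures from the first one in their lists (they start at zero)
--     h, t = 0, 0
--     result = 0
--
--     # Keep checking until we run out of hunters or treasures
--     while h < len(hunters) and t < len(treasures):
--         if abs(hunters[h] - treasures[t]) <= k:
--             # Hunter can reach this treasure, so we count it
--             result += 1
--             h += 1
--             t += 1
--         elif treasures[t] < hunters[h]:
--             # This treasure is too far left, so they move to the next treasure
--             t += 1
--         else:
--             # This hunter is too far left, move to the next hunter
--             h += 1
--
--     return result
-- ===== SOURCE B (Python) =====
-- def hunt_treasure(arr, n, k):
--     """Single streaming pass: keep a queue of pending unmatched positions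
--     (at most one of the two queues is ever non-empty); purge unreachable
--     fronts, match against the front, else enqueue."""
--     pend_h = []  # unmatched hunter positions
--     pend_t = []  # unmatched treasure positions
--     result = 0
--     for i in range(n):
--         c = arr[i]
--         if c == 'H':
--             while pend_t and i - pend_t[0] > k:
--                 pend_t.pop(0)
--             if pend_t:
--                 pend_t.pop(0)
--                 result += 1
--             else:
--                 pend_h.append(i)
--         elif c == 'T':
--             while pend_h and i - pend_h[0] > k:
--                 pend_h.pop(0)
--             if pend_h:
--                 pend_h.pop(0)
--                 result += 1
--             else:
--                 pend_t.append(i)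
--     return result
-- ===== Notes on version B (the rewrite author's own statement) =====
-- stated objective: alternative
-- what changed: Replaced the collect-then-two-pointer greedy (build hunter and treasure position lists, then a while loop walking both) by a single streaming pass that maintains pending queues of unmatched positions (at most one side ever pending), purging fronts that fall out of reach and matching against the front.
import Mathlib
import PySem

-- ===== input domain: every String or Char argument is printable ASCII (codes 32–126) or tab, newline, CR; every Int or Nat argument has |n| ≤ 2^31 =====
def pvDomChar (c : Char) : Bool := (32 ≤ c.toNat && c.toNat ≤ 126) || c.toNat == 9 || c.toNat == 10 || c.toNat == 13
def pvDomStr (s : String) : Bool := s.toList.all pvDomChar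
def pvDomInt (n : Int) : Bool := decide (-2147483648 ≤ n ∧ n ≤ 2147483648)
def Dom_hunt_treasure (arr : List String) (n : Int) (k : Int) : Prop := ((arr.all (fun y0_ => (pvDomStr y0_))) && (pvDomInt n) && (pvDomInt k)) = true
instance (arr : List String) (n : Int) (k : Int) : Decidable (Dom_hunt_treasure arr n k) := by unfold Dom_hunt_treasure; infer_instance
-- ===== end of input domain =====

-- B replaces A's collect-then-two-pointer greedy by a single streaming pass with pending queues; same cost, different decomposition.

-- ===== PORT A =====
-- A's while loop over indices h, t into the position lists, transliterated as
-- recursion consuming the two lists, with the running `result` as accumulator.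
def pvLoopA (k : Int) : List Int → List Int → Int → Int
  | h::hs, t::ts, r =>
    if |h - t| ≤ k then pvLoopA k hs ts (r + 1)
    else if t < h then pvLoopA k (h::hs) ts r
    else pvLoopA k hs (t::ts) r
  | _, _, r => r
termination_by hs ts _ => hs.length + ts.length
decreasing_by all_goals simp_wf <;> omega

def hunt_treasure (arr : List String) (n : Int) (k : Int) : Int :=
  -- the scan appending to `hunters` / `treasures`; arr[i] via pyGet? (in range under Pre_)
  let p := (PySem.List.pyRange 0 n 1).foldl
    (fun (s : List Int × List Int) i =>
      if (PySem.List.pyGet? arr i).getD "" = "H" then (s.1 ++ [i], s.2)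
      else if (PySem.List.pyGet? arr i).getD "" = "T" then (s.1, s.2 ++ [i])
      else s) ([], [])
  pvLoopA k p.1 p.2 0

-- ===== PORT B =====
-- the `while pend and i - pend[0] > k: pend.pop(0)` purge loop
def pvPurge (k i : Int) : List Int → List Int
  | [] => []
  | p::ps => if i - p > k then pvPurge k i ps else p::ps

-- one iteration of B's for loop; state = (pend_h, pend_t, result)
def pvStepB (arr : List String) (k : Int) (s : List Int × List Int × Int) (i : Int) :
    List Int × List Int × Int :=
  let c := (PySem.List.pyGet? arr i).getD ""
  if c = "H" then
    match pvPurge k i s.2.1 with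
    | [] => (s.1 ++ [i], [], s.2.2)
    | _::ts => (s.1, ts, s.2.2 + 1)
  else if c = "T" then
    match pvPurge k i s.1 with
    | [] => ([], s.2.1 ++ [i], s.2.2)
    | _::hs => (hs, s.2.1, s.2.2 + 1)
  else s

def hunt_treasure_alt (arr : List String) (n : Int) (k : Int) : Int :=
  ((PySem.List.pyRange 0 n 1).foldl (pvStepB arr k) ([], [], 0)).2.2

-- ===== PRECONDITION & SPEC =====
-- A raises IndexError (arr[i]) as soon as n exceeds len(arr); exactly those inputs are excluded.
def Pre_hunt_treasure (arr : List String) (n : Int) (k : Int) : Prop := n ≤ (arr.length : Int)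
instance (arr : List String) (n : Int) (k : Int) : Decidable (Pre_hunt_treasure arr n k) := by
  unfold Pre_hunt_treasure; infer_instance

def pvWitness_hunt_treasure : List String × Int × Int := (["H", "x", "T", "H"], 4, 2)

def Spec_hunt_treasure (arr : List String) (n : Int) (k : Int) (out : Int) : Prop := out = hunt_treasure_alt arr n k
instance (arr : List String) (n : Int) (k : Int) (out : Int) : Decidable (Spec_hunt_treasure arr n k out) := by unfold Spec_hunt_treasure; infer_instance

-- ===== CLAIM (what is proved, stated in full; the proofs are below) =====
def Claim_equal_hunt_treasure : Prop := ∀ (arr : List String) (n : Int) (k : Int), Dom_hunt_treasure arr n k → Pre_hunt_treasure arr n k → Spec_hunt_treasure arr n k (hunt_treasure arr n k)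

-- ===== LEMMAS AND PROOFS =====

theorem pvLoopA_nil_left (k : Int) (ts : List Int) (r : Int) : pvLoopA k [] ts r = r := by
  cases ts <;> simp [pvLoopA]

theorem pvLoopA_nil_right (k : Int) (hs : List Int) (r : Int) : pvLoopA k hs [] r = r := by
  cases hs <;> simp [pvLoopA]

theorem pvPurge_sublist (k i : Int) (q : List Int) : (pvPurge k i q).Sublist q := by
  induction q with
  | nil => simp [pvPurge]
  | cons p ps ih =>
    simp only [pvPurge]
    split
    · exact ih.trans (List.sublist_cons_self p ps)
    · exact List.Sublist.refl _

theorem pvPurge_head (k i : Int) (q : List Int) (t' : Int) (ts' : List Int)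
    (h : pvPurge k i q = t' :: ts') : i - t' ≤ k := by
  induction q with
  | nil => simp [pvPurge] at h
  | cons p ps ih =>
    simp only [pvPurge] at h
    split at h
    · exact ih h
    · cases h; omega

-- purging treasures that fell out of reach = A skipping those treasures (t < h, gap > k)
theorem pvPurge_loop_t (k i : Int) (hs rest : List Int) (r : Int) :
    ∀ (q : List Int), (∀ t ∈ q, t < i) →
      pvLoopA k (i :: hs) (q ++ rest) r = pvLoopA k (i :: hs) (pvPurge k i q ++ rest) r := by
  intro q
  induction q with
  | nil => intro _; rfl
  | cons t ts ih =>
    intro hlt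
    have ht : t < i := hlt t (by simp)
    simp only [pvPurge]
    split
    · rename_i hgt
      rw [List.cons_append, pvLoopA,
        if_neg (by rw [abs_of_pos (by omega)]; omega), if_pos ht]
      exact ih (fun x hx => hlt x (by simp [hx]))
    · rfl

-- purging hunters that fell out of reach = A skipping those hunters (h < t, gap > k)
theorem pvPurge_loop_h (k i : Int) (ts rest : List Int) (r : Int) :
    ∀ (q : List Int), (∀ h ∈ q, h < i) →
      pvLoopA k (q ++ rest) (i :: ts) r = pvLoopA k (pvPurge k i q ++ rest) (i :: ts) r := by
  intro q
  induction q with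
  | nil => intro _; rfl
  | cons h hs ih =>
    intro hlt
    have hh : h < i := hlt h (by simp)
    simp only [pvPurge]
    split
    · rename_i hgt
      rw [List.cons_append, pvLoopA,
        if_neg (by rw [abs_of_neg (by omega)]; omega), if_neg (by omega)]
      exact ih (fun x hx => hlt x (by simp [hx]))
    · rfl

-- main invariant: the streaming fold from pending state (qH, qT, r) computes
-- A's two-pointer greedy on (qH ++ future hunters, qT ++ future treasures)
theorem pvMain (arr : List String) (k : Int) :
    ∀ (l qH qT : List Int) (r : Int),
      (qH = [] ∨ qT = []) →
      (qH ++ l).Pairwise (· < ·) →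
      (qT ++ l).Pairwise (· < ·) →
      (l.foldl (pvStepB arr k) (qH, qT, r)).2.2
        = pvLoopA k (qH ++ l.filter (fun i => (PySem.List.pyGet? arr i).getD "" == "H"))
                    (qT ++ l.filter (fun i => (PySem.List.pyGet? arr i).getD "" == "T")) r := by
  intro l
  induction l with
  | nil =>
    intro qH qT r hemp _ _
    rcases hemp with h | h <;> subst h <;>
      simp [pvLoopA_nil_left, pvLoopA_nil_right]
  | cons i l ih =>
    intro qH qT r hemp hH hT
    have hqHlt : ∀ x ∈ qH, x < i := fun x hx =>
      (List.pairwise_append.mp hH).2.2 x hx i (by simp)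
    have hqTlt : ∀ x ∈ qT, x < i := fun x hx =>
      (List.pairwise_append.mp hT).2.2 x hx i (by simp)
    have hil : (i :: l).Pairwise (· < ·) := (List.pairwise_append.mp hH).2.1
    have hl : l.Pairwise (· < ·) := (List.pairwise_cons.mp hil).2
    simp only [List.foldl_cons, List.filter_cons]
    by_cases hcH : (PySem.List.pyGet? arr i).getD "" = "H"
    · -- current spot is a hunter
      have hcT : ¬ (PySem.List.pyGet? arr i).getD "" = "T" := by simp [hcH]
      rcases hqT : qT with _ | ⟨t, ts⟩
      · -- no pending treasures: enqueue i as a pending hunter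
        subst hqT
        simp only [pvStepB, hcH, if_pos, pvPurge]
        rw [ih (qH ++ [i]) [] r (Or.inr rfl)
            (by simpa using hH) (by simpa using hl)]
        simp
      · -- pending treasures: purge the stale ones, then match the front (if any)
        have hqHnil : qH = [] := by
          rcases hemp with h | h
          · exact h
          · simp [hqT] at h
        subst hqHnil; subst hqT
        have hrw := pvPurge_loop_t k i
          (List.filter (fun j => (PySem.List.pyGet? arr j).getD "" == "H") l)
          (List.filter (fun j => (PySem.List.pyGet? arr j).getD "" == "T") l) r (t::ts) hqTlt
        rcases hp : pvPurge k i (t::ts) with _ | ⟨t', ts'⟩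
        · -- every pending treasure was out of reach: enqueue i
          simp only [pvStepB, hcH, if_pos, hp, List.nil_append]
          rw [ih [i] [] r (Or.inr rfl) (by simpa using hil) (by simpa using hl)]
          simp only [hp, List.nil_append] at hrw
          simpa [hcH, hcT] using hrw.symm
        · -- match i with the front pending treasure t'
          simp only [pvStepB, hcH, if_pos, hp]
          have hsub : (t'::ts').Sublist (t::ts) := hp ▸ pvPurge_sublist k i (t::ts)
          have ht'lt : t' < i := hqTlt t' (hsub.subset (by simp))
          have ht'k : i - t' ≤ k := pvPurge_head k i (t::ts) t' ts' hp
          have hts' : (ts' ++ l).Pairwise (· < ·) :=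
            hT.sublist (List.Sublist.append ((List.sublist_cons_self t' ts').trans hsub)
              (List.sublist_cons_self i l))
          rw [ih [] ts' (r + 1) (Or.inl rfl) (by simpa using hl) hts']
          have hstep : pvLoopA k (i :: List.filter (fun j => (PySem.List.pyGet? arr j).getD "" == "H") l)
              ((t'::ts') ++ List.filter (fun j => (PySem.List.pyGet? arr j).getD "" == "T") l) r
            = pvLoopA k (List.filter (fun j => (PySem.List.pyGet? arr j).getD "" == "H") l)
              (ts' ++ List.filter (fun j => (PySem.List.pyGet? arr j).getD "" == "T") l) (r + 1) := by
            rw [List.cons_append, pvLoopA, if_pos (by rw [abs_of_pos (by omega)]; omega)]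
          rw [hp, hstep] at hrw
          simpa [hcH, hcT] using hrw.symm
    · by_cases hcT : (PySem.List.pyGet? arr i).getD "" = "T"
      · -- current spot is a treasure (mirror image)
        rcases hqH : qH with _ | ⟨h, hs⟩
        · subst hqH
          simp only [pvStepB]
          rw [if_neg hcH, if_pos hcT]
          simp only [pvPurge]
          rw [ih [] (qT ++ [i]) r (Or.inl rfl)
              (by simpa using hl) (by simpa using hT)]
          simp [hcT]
        · have hqTnil : qT = [] := by
            rcases hemp with h' | h'
            · simp [hqH] at h'
            · exact h'
          subst hqTnil; subst hqH
          have hrw := pvPurge_loop_h k i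
            (List.filter (fun j => (PySem.List.pyGet? arr j).getD "" == "T") l)
            (List.filter (fun j => (PySem.List.pyGet? arr j).getD "" == "H") l) r (h::hs) hqHlt
          rcases hp : pvPurge k i (h::hs) with _ | ⟨h', hs'⟩
          · simp only [pvStepB]
            rw [if_neg hcH, if_pos hcT]
            simp only [hp, List.nil_append]
            rw [ih [] [i] r (Or.inl rfl) (by simpa using hl) (by simpa using hil)]
            simp only [hp, List.nil_append] at hrw
            simpa [hcH, hcT] using hrw.symm
          · simp only [pvStepB]
            rw [if_neg hcH, if_pos hcT]
            simp only [hp]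
            have hsub : (h'::hs').Sublist (h::hs) := hp ▸ pvPurge_sublist k i (h::hs)
            have hh'lt : h' < i := hqHlt h' (hsub.subset (by simp))
            have hh'k : i - h' ≤ k := pvPurge_head k i (h::hs) h' hs' hp
            have hhs' : (hs' ++ l).Pairwise (· < ·) :=
              hH.sublist (List.Sublist.append ((List.sublist_cons_self h' hs').trans hsub)
                (List.sublist_cons_self i l))
            rw [ih hs' [] (r + 1) (Or.inr rfl) hhs' (by simpa using hl)]
            have hstep : pvLoopA k ((h'::hs') ++ List.filter (fun j => (PySem.List.pyGet? arr j).getD "" == "H") l)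
                (i :: List.filter (fun j => (PySem.List.pyGet? arr j).getD "" == "T") l) r
              = pvLoopA k (hs' ++ List.filter (fun j => (PySem.List.pyGet? arr j).getD "" == "H") l)
                (List.filter (fun j => (PySem.List.pyGet? arr j).getD "" == "T") l) (r + 1) := by
              rw [List.cons_append, pvLoopA, if_pos (by rw [abs_of_neg (by omega)]; omega)]
            rw [hp, hstep] at hrw
            simpa [hcH, hcT] using hrw.symm
      · -- neither hunter nor treasure: nothing changes
        have hHl : (qH ++ l).Pairwise (· < ·) :=
          hH.sublist (List.Sublist.append (List.Sublist.refl qH) (List.sublist_cons_self i l))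
        have hTl : (qT ++ l).Pairwise (· < ·) :=
          hT.sublist (List.Sublist.append (List.Sublist.refl qT) (List.sublist_cons_self i l))
        simp only [pvStepB]
        rw [if_neg hcH, if_neg hcT]
        rw [ih qH qT r hemp hHl hTl]
        simp [hcH, hcT]

-- A's scan builds exactly the filtered position lists
theorem pvScanA (arr : List String) :
    ∀ (l : List Int) (aH aT : List Int),
      l.foldl (fun (s : List Int × List Int) i =>
          if (PySem.List.pyGet? arr i).getD "" = "H" then (s.1 ++ [i], s.2)
          else if (PySem.List.pyGet? arr i).getD "" = "T" then (s.1, s.2 ++ [i])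
          else s) (aH, aT)
        = (aH ++ l.filter (fun i => (PySem.List.pyGet? arr i).getD "" == "H"),
           aT ++ l.filter (fun i => (PySem.List.pyGet? arr i).getD "" == "T")) := by
  intro l
  induction l with
  | nil => intro aH aT; simp
  | cons i l ih =>
    intro aH aT
    simp only [List.foldl_cons, List.filter_cons]
    by_cases hcH : (PySem.List.pyGet? arr i).getD "" = "H"
    · simp [hcH, ih]
    · by_cases hcT : (PySem.List.pyGet? arr i).getD "" = "T" <;> simp [hcH, hcT, ih]

-- ===== VERDICT (by name: the statement is the Claim_ definition above) =====
theorem hunt_treasure_spec : Claim_equal_hunt_treasure := by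
  intro arr n k _ _
  unfold Spec_hunt_treasure hunt_treasure hunt_treasure_alt
  rw [pvScanA arr (PySem.List.pyRange 0 n 1) [] []]
  rw [pvMain arr k (PySem.List.pyRange 0 n 1) [] [] 0 (Or.inl rfl)
    (by simpa using PySem.List.pairwise_lt_pyRange_one 0 n)
    (by simpa using PySem.List.pairwise_lt_pyRange_one 0 n)]
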